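-- pv_equiv track=rewrite | github.com/mantidproject/mantid | Framework/DataObjects/src/generate_mdevent_declarations.py | get_padding
-- ===== SOURCE A (Python) =====
-- def get_padding(line):
--     """Return a string with the spaces padding the start of the given line."""
--     out = ""
--     for c in line:
--         if c == " ":
--             out += " "
--         else:
--             break
--     return out
-- ===== SOURCE B (Python) =====
-- def get_padding(line):
--     """Return a string with the spaces padding the start of the given line."""
--     stripped = line.lstrip(' ')
--     return line[:len(line) - len(stripped)]
-- ===== Notes on version B (the rewrite author's own statement) =====
-- stated objective: idiomatic
-- what changed: Replaces the explicit character loop (with break and string accumulation) by a space-only lstrip plus a slice recovering the removed prefix.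
import Mathlib
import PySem

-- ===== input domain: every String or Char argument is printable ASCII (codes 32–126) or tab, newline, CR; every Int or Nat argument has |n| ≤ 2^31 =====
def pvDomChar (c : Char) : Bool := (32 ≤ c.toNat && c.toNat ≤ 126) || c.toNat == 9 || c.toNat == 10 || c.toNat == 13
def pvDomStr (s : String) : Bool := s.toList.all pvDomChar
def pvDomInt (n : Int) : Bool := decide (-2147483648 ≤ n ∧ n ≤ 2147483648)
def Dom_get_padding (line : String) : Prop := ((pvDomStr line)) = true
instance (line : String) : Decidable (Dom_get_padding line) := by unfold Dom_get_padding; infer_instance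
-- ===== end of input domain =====

-- B replaces A's accumulate-spaces loop with lstrip(' ') plus a slice (idiomatic; same result).

-- ===== PORT A =====
-- the for-loop with break: walk the characters, appending " " to out while c == ' ', stop at the first other char
def getPaddingLoop (acc : List Char) : List Char → List Char
  | [] => acc
  | c :: cs => if c == ' ' then getPaddingLoop (acc ++ [' ']) cs else acc

def get_padding (line : String) : String :=
  String.mk (getPaddingLoop [] line.toList)

-- ===== PORT B =====
-- stripped = line.lstrip(' ')  (dropWhile on spaces, exactly Python's lstrip with chars = " ");
-- return line[:len(line) - len(stripped)]
def get_padding_alt (line : String) : String :=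
  let stripped := line.toList.dropWhile (fun c => c == ' ')
  String.mk (line.toList.take (line.toList.length - stripped.length))

-- ===== PRECONDITION & SPEC =====
def Spec_get_padding (line : String) (out : String) : Prop := out = get_padding_alt line
instance (line : String) (out : String) : Decidable (Spec_get_padding line out) := by unfold Spec_get_padding; infer_instance

-- ===== CLAIM (what is proved, stated in full; the proofs are below) =====
def Claim_equal_get_padding : Prop := ∀ (line : String), Dom_get_padding line → Spec_get_padding line (get_padding line)

-- ===== LEMMAS AND PROOFS =====

theorem getPaddingLoop_eq (l acc : List Char) :
    getPaddingLoop acc l = acc ++ l.takeWhile (fun c => c == ' ') := by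
  induction l generalizing acc with
  | nil => simp [getPaddingLoop]
  | cons c cs ih =>
    by_cases h : c = ' '
    · simp [getPaddingLoop, h, ih, List.takeWhile]
    · simp [getPaddingLoop, h, List.takeWhile_cons, beq_iff_eq]

theorem take_sub_dropWhile (l : List Char) (p : Char → Bool) :
    l.take (l.length - (l.dropWhile p).length) = l.takeWhile p := by
  have hlen : (l.takeWhile p).length + (l.dropWhile p).length = l.length := by
    rw [← List.length_append, List.takeWhile_append_dropWhile]
  have hk : l.length - (l.dropWhile p).length = (l.takeWhile p).length := by omega
  rw [hk, ← List.prefix_iff_eq_take.mp (l.takeWhile_prefix p)]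

-- ===== VERDICT (by name: the statement is the Claim_ definition above) =====
theorem get_padding_spec : Claim_equal_get_padding := by
  intro line _
  simp only [Spec_get_padding, get_padding, get_padding_alt]
  rw [getPaddingLoop_eq, take_sub_dropWhile]
  simp
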